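-- pv_equiv track=rewrite | github.com/thenervelab/hippius-s3 | hippius_s3/planning/range_planner.py | build_part_offsets
-- ===== SOURCE A (Python) =====
-- from typing import TypedDict
--
-- class PartOffset(TypedDict):
--     part_number: int
--     offset: int
--     plain_size: int
--
-- class PartInput(TypedDict):
--     part_number: int
--     plain_size: int
--
-- def build_part_offsets(parts: list[PartInput]) -> list[PartOffset]:
--     """Build plaintext offset map for each part.
--
--     Args:
--         parts: List of {part_number, plain_size} from DB, ordered by part_number.
--
--     Returns:
--         List of {part_number, offset, plain_size} with cumulative offsets.
--     """
--     result: list[PartOffset] = []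
--     cumulative = 0
--     for p in sorted(parts, key=lambda x: x["part_number"]):
--         result.append(
--             {
--                 "part_number": p["part_number"],
--                 "offset": cumulative,
--                 "plain_size": p["plain_size"],
--             }
--         )
--         cumulative += p["plain_size"]
--     return result
-- ===== SOURCE B (Python) =====
-- def build_part_offsets(parts):
--     """Each part's offset is recomputed as the sum of the sizes of the parts
--     before it in the sorted order (nested prefix-slice sums, no running total)."""
--     sp = sorted(parts, key=lambda x: x["part_number"])
--     return [
--         {
--             "part_number": p["part_number"],
--             "offset": sum(q["plain_size"] for q in sp[:i]),
--             "plain_size": p["plain_size"],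
--         }
--         for i, p in enumerate(sp)
--     ]
-- ===== Notes on version B (the rewrite author's own statement) =====
-- stated objective: alternative
-- what changed: The running total mutated inside A's append loop disappears: B recomputes each part's offset independently as the sum of the plain_size values of the prefix slice sp[:i] of the sorted list (nested scans instead of a single accumulator pass).
import Mathlib
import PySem

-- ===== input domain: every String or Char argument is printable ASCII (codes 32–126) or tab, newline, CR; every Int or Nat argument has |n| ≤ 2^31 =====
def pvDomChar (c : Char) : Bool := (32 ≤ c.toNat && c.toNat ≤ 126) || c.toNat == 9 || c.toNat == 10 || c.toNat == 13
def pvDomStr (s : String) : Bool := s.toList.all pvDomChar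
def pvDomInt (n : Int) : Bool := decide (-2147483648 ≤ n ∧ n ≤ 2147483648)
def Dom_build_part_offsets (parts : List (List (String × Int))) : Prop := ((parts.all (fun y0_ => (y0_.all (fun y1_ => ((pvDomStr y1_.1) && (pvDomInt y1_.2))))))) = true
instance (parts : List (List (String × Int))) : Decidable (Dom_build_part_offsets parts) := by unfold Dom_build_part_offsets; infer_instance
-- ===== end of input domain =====

-- B drops A's running total: each part's offset is recomputed independently as the sum of
-- the plain_size values of the sorted prefix slice sp[:i] (alternative; O(n^2) vs O(n log n)).

-- ===== PORT A =====
-- d[k] for an assoc-list dict: first matching key. Exact when the key is present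
-- (guaranteed by Pre_); Python raises KeyError otherwise, which Pre_ excludes.
def pget (d : List (String × Int)) (k : String) : Int :=
  ((d.find? (fun kv => kv.1 == k)).map Prod.snd).getD 0

def build_part_offsets (parts : List (List (String × Int))) : List (List (String × Int)) :=
  (((PySem.List.sorted parts (fun x => pget x "part_number") false).foldl
      (fun (st : List (List (String × Int)) × Int) p =>
        (st.1 ++ [[("part_number", pget p "part_number"),
                   ("offset", st.2),
                   ("plain_size", pget p "plain_size")]],
         st.2 + pget p "plain_size"))
      ([], 0))).1

-- ===== PORT B =====
def build_part_offsets_alt (parts : List (List (String × Int))) : List (List (String × Int)) :=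
  let sp := PySem.List.sorted parts (fun x => pget x "part_number") false
  (PySem.List.enumerate sp 0).map (fun ip =>
    [("part_number", pget ip.2 "part_number"),
     ("offset", ((PySem.List.slice sp none (some ip.1)).map (fun q => pget q "plain_size")).sum),
     ("plain_size", pget ip.2 "plain_size")])

-- ===== PRECONDITION & SPEC =====
-- Pre_ excludes only inputs on which A raises KeyError: every part dict must carry
-- the "part_number" and "plain_size" keys.
def Pre_build_part_offsets (parts : List (List (String × Int))) : Prop :=
  (parts.all (fun p => (p.find? (fun kv => kv.1 == "part_number")).isSome
                    && (p.find? (fun kv => kv.1 == "plain_size")).isSome)) = true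
instance (parts : List (List (String × Int))) : Decidable (Pre_build_part_offsets parts) := by
  unfold Pre_build_part_offsets; infer_instance

def pvWitness_build_part_offsets : (List (List (String × Int))) :=
  [[("part_number", 2), ("plain_size", 5)], [("part_number", 1), ("plain_size", 3)]]

def Spec_build_part_offsets (parts : List (List (String × Int))) (out : List (List (String × Int))) : Prop := out = build_part_offsets_alt parts
instance (parts : List (List (String × Int))) (out : List (List (String × Int))) : Decidable (Spec_build_part_offsets parts out) := by unfold Spec_build_part_offsets; infer_instance

-- ===== CLAIM (what is proved, stated in full; the proofs are below) =====
def Claim_equal_build_part_offsets : Prop := ∀ (parts : List (List (String × Int))), Dom_build_part_offsets parts → Pre_build_part_offsets parts → Spec_build_part_offsets parts (build_part_offsets parts)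

-- ===== LEMMAS AND PROOFS =====
-- offsets [c, c+s0, c+s0+s1, …] (n+1 values): the common ladder both proofs meet at
def pvAccum : List Int → Int → List Int
  | [], acc => [acc]
  | x :: xs, acc => acc :: pvAccum xs (acc + x)

-- A's fold with a running total produces row p (prefix sum) at each position
theorem pv_foldl_accum (sz : List (String × Int) → Int)
    (row : List (String × Int) → Int → List (String × Int)) :
    ∀ (l : List (List (String × Int))) (res : List (List (String × Int))) (c : Int),
    (l.foldl (fun (st : List (List (String × Int)) × Int) p =>
        (st.1 ++ [row p st.2], st.2 + sz p)) (res, c)).1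
      = res ++ (l.zip (pvAccum (l.map sz) c)).map (fun q => row q.1 q.2) := by
  intro l
  induction l with
  | nil => intro res c; simp [pvAccum]
  | cons p l ih =>
      intro res c
      simp only [List.foldl_cons, List.map_cons, pvAccum, List.zip_cons_cons, List.map]
      rw [ih]
      simp

-- B's enumerate-and-slice comprehension over full = pre ++ l meets the same ladder
theorem pv_enum_slice (sz : List (String × Int) → Int)
    (row : List (String × Int) → Int → List (String × Int)) :
    ∀ (l pre : List (List (String × Int))),
    (PySem.List.enumerate l (pre.length : Int)).map
      (fun ip => row ip.2 (((PySem.List.slice (pre ++ l) none (some ip.1)).map sz).sum))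
      = (l.zip (pvAccum (l.map sz) ((pre.map sz).sum))).map (fun q => row q.1 q.2) := by
  intro l
  induction l with
  | nil => intro pre; simp [PySem.List.enumerate_nil, pvAccum]
  | cons x l ih =>
      intro pre
      rw [PySem.List.enumerate_cons]
      simp only [List.map_cons, List.zip_cons_cons, pvAccum]
      congr 1
      · rw [PySem.List.slice_to_natCast]
        simp
      · have h1 : (pre.length : Int) + 1 = ((pre ++ [x]).length : Int) := by
          simp
        have h2 : pre ++ x :: l = (pre ++ [x]) ++ l := by simp
        rw [h1, h2, ih (pre ++ [x])]
        simp [add_comm]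

-- ===== VERDICT (by name: the statement is the Claim_ definition above) =====
theorem build_part_offsets_spec : Claim_equal_build_part_offsets := by
  intro parts _ _
  show build_part_offsets parts = build_part_offsets_alt parts
  unfold build_part_offsets build_part_offsets_alt
  rw [pv_foldl_accum (fun p => pget p "plain_size")
    (fun p off => [("part_number", pget p "part_number"), ("offset", off),
                   ("plain_size", pget p "plain_size")]) _ [] 0]
  have := pv_enum_slice (fun p => pget p "plain_size")
    (fun p off => [("part_number", pget p "part_number"), ("offset", off),
                   ("plain_size", pget p "plain_size")])
    (PySem.List.sorted parts (fun x => pget x "part_number") false) []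
  simpa using this.symm
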